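-- pv_equiv track=rewrite | github.com/rexelardo/yiddishTTS | legacy_files/better_tts.py | find_substitute_phoneme
-- ===== SOURCE A (Python) =====
-- def find_substitute_phoneme(target_phoneme, phoneme_library):
--     """
--     Find a similar phoneme if the exact one isn't available
--     """
--     # Define phoneme similarity groups
--     similarity_groups = {
--         # Vowels
--         'a': ['e', 'i'],
--         'e': ['a', 'i'],
--         'i': ['e', 'a'],
--         'u': ['o', 'a'],
--         'o': ['u', 'a'],
--
--         # Consonants
--         'b': ['p', 'd'],
--         'p': ['b', 't'],
--         'd': ['t', 'b'],
--         't': ['d', 'p'],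
--         'g': ['k', 'd'],
--         'k': ['g', 't'],
--         's': ['z', 'sh'],
--         'z': ['s', 'zh'],
--         'sh': ['s', 'zh'],
--         'zh': ['z', 'sh'],
--         'm': ['n'],
--         'n': ['m'],
--         'l': ['r'],
--         'r': ['l'],
--     }
--
--     # First try exact match
--     if target_phoneme in phoneme_library:
--         return target_phoneme
--
--     # Try similar phonemes
--     if target_phoneme in similarity_groups:
--         for similar in similarity_groups[target_phoneme]:
--             if similar in phoneme_library:
--                 return similar
--
--     # Try any vowel for vowels, any consonant for consonants
--     vowels = ['a', 'e', 'i', 'u', 'o']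
--     consonants = ['b', 'p', 'd', 't', 'g', 'k', 's', 'z', 'm', 'n', 'l', 'r']
--
--     if target_phoneme in vowels:
--         for vowel in vowels:
--             if vowel in phoneme_library:
--                 return vowel
--     elif target_phoneme in consonants:
--         for consonant in consonants:
--             if consonant in phoneme_library:
--                 return consonant
--
--     return None
-- ===== SOURCE B (Python) =====
-- def find_substitute_phoneme(target_phoneme, phoneme_library):
--     """Find a similar phoneme if the exact one isn't available."""
--     similarity_groups = {
--         'a': ['e', 'i'], 'e': ['a', 'i'], 'i': ['e', 'a'],
--         'u': ['o', 'a'], 'o': ['u', 'a'],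
--         'b': ['p', 'd'], 'p': ['b', 't'], 'd': ['t', 'b'], 't': ['d', 'p'],
--         'g': ['k', 'd'], 'k': ['g', 't'],
--         's': ['z', 'sh'], 'z': ['s', 'zh'], 'sh': ['s', 'zh'], 'zh': ['z', 'sh'],
--         'm': ['n'], 'n': ['m'], 'l': ['r'], 'r': ['l'],
--     }
--     vowels = ['a', 'e', 'i', 'u', 'o']
--     consonants = ['b', 'p', 'd', 't', 'g', 'k', 's', 'z', 'm', 'n', 'l', 'r']
--
--     prefs = [target_phoneme] + similarity_groups.get(target_phoneme, [])
--     if target_phoneme in vowels: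
--         prefs += vowels
--     elif target_phoneme in consonants:
--         prefs += consonants
--
--     # Loop inversion: one pass over the LIBRARY, ranking each phoneme by its
--     # preference position and keeping the argmin (ties impossible: equal rank
--     # means equal string, and strict '<' keeps the earliest library hit).
--     best = None  # (rank, phoneme)
--     for ph in phoneme_library:
--         if ph in prefs:
--             r = prefs.index(ph)
--             if best is None or r < best[0]:
--                 best = (r, ph)
--     return best[1] if best is not None else None
-- ===== Notes on version B (the rewrite author's own statement) =====
-- stated objective: alternative
-- what changed: Loop inversion: instead of A's staged scans over candidate lists testing library membership, B makes one pass over the library, ranking each phoneme by its position in the preference list (target, similarity group, vowel/consonant class) and returning the argmin-ranked phoneme.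
import Mathlib
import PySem

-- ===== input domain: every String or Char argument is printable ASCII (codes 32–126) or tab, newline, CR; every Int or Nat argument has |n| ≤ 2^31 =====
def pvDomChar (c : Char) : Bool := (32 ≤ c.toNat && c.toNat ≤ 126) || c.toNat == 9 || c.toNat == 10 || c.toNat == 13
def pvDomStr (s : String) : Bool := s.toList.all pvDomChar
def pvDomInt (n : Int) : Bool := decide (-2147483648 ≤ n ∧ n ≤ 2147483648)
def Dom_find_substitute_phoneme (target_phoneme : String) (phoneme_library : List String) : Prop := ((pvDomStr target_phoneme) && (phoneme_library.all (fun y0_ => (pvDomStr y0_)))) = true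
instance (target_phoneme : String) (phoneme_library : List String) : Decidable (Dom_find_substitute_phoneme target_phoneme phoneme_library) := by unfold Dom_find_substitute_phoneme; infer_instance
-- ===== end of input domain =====

-- B inverts the loops: instead of A's staged scans over candidate lists testing library
-- membership, it makes ONE pass over the library, ranking each phoneme by its position in
-- the preference list and keeping the argmin (objective: alternative algorithm, same cost).

-- shared literal data: the similarity-groups dict of the Python source
def pvSimGroups : PySem.Dict String (List String) :=
  PySem.Dict.ofList [
    ("a", ["e", "i"]), ("e", ["a", "i"]), ("i", ["e", "a"]),
    ("u", ["o", "a"]), ("o", ["u", "a"]),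
    ("b", ["p", "d"]), ("p", ["b", "t"]), ("d", ["t", "b"]), ("t", ["d", "p"]),
    ("g", ["k", "d"]), ("k", ["g", "t"]),
    ("s", ["z", "sh"]), ("z", ["s", "zh"]), ("sh", ["s", "zh"]), ("zh", ["z", "sh"]),
    ("m", ["n"]), ("n", ["m"]), ("l", ["r"]), ("r", ["l"])]

-- ===== PORT A =====
-- A's 'for x in …: if x in phoneme_library: return x' loops
def pvLoopA (cands phoneme_library : List String) : Option String :=
  match cands with
  | [] => none
  | c :: rest => if phoneme_library.contains c then some c else pvLoopA rest phoneme_library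

def find_substitute_phoneme (target_phoneme : String) (phoneme_library : List String) : Option String :=
  -- First try exact match
  if phoneme_library.contains target_phoneme then some target_phoneme
  else
    -- Try similar phonemes
    let sim_result : Option String :=
      match pvSimGroups.get? target_phoneme with
      | some lst => pvLoopA lst phoneme_library
      | none => none
    match sim_result with
    | some r => some r
    | none =>
      -- Try any vowel for vowels, any consonant for consonants
      let vowels := ["a", "e", "i", "u", "o"]
      let consonants := ["b", "p", "d", "t", "g", "k", "s", "z", "m", "n", "l", "r"]
      if vowels.contains target_phoneme then pvLoopA vowels phoneme_library
      else if consonants.contains target_phoneme then pvLoopA consonants phoneme_library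
      else none

-- ===== PORT B =====
-- B's preference list: target, its similarity group, then its class (vowel/consonant)
def pvPrefs (target_phoneme : String) : List String :=
  let vowels := ["a", "e", "i", "u", "o"]
  let consonants := ["b", "p", "d", "t", "g", "k", "s", "z", "m", "n", "l", "r"]
  [target_phoneme] ++ pvSimGroups.getD target_phoneme [] ++
    (if vowels.contains target_phoneme then vowels
     else if consonants.contains target_phoneme then consonants
     else [])

-- B's loop body: 'if ph in prefs: r = prefs.index(ph); replace best if r < best rank'
-- ('ph in prefs' + 'prefs.index(ph)' ported together as one match on PySem.List.index?,
-- which is some exactly when membership holds)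
def pvStepB (prefs : List String) (acc : Option (Nat × String)) (ph : String) : Option (Nat × String) :=
  match PySem.List.index? prefs ph with
  | none => acc
  | some r =>
    match acc with
    | none => some (r, ph)
    | some (br, bp) => if r < br then some (r, ph) else some (br, bp)

def find_substitute_phoneme_alt (target_phoneme : String) (phoneme_library : List String) : Option String :=
  let prefs := pvPrefs target_phoneme
  match phoneme_library.foldl (pvStepB prefs) none with
  | some (_, p) => some p
  | none => none

-- ===== PRECONDITION & SPEC =====
def Spec_find_substitute_phoneme (target_phoneme : String) (phoneme_library : List String) (out : Option String) : Prop := out = find_substitute_phoneme_alt target_phoneme phoneme_library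
instance (target_phoneme : String) (phoneme_library : List String) (out : Option String) : Decidable (Spec_find_substitute_phoneme target_phoneme phoneme_library out) := by unfold Spec_find_substitute_phoneme; infer_instance

-- ===== CLAIM (what is proved, stated in full; the proofs are below) =====
def Claim_equal_find_substitute_phoneme : Prop := ∀ (target_phoneme : String) (phoneme_library : List String), Dom_find_substitute_phoneme target_phoneme phoneme_library → Spec_find_substitute_phoneme target_phoneme phoneme_library (find_substitute_phoneme target_phoneme phoneme_library)

-- ===== LEMMAS AND PROOFS =====

-- first preference present in the library (A's behaviour, abstractly)
def pvFirstIn (cands phoneme_library : List String) : Option String :=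
  match cands with
  | [] => none
  | c :: rest => if phoneme_library.contains c then some c else pvFirstIn rest phoneme_library

-- the argmin B's fold computes, as structural recursion on the library
def pvBest (prefs lib : List String) : Option (Nat × String) :=
  match lib with
  | [] => none
  | ph :: rest =>
    match PySem.List.index? prefs ph with
    | none => pvBest prefs rest
    | some r =>
      match pvBest prefs rest with
      | none => some (r, ph)
      | some (j, q) => if j < r then some (j, q) else some (r, ph)

def pvMerge (acc f : Option (Nat × String)) : Option (Nat × String) :=
  match f with
  | none => acc
  | some (j, q) =>
    match acc with
    | none => some (j, q)
    | some (br, bp) => if j < br then some (j, q) else some (br, bp)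

theorem pvFoldB_eq_best (prefs lib : List String) (acc : Option (Nat × String)) :
    lib.foldl (pvStepB prefs) acc = pvMerge acc (pvBest prefs lib) := by
  induction lib generalizing acc with
  | nil => rfl
  | cons ph rest ih =>
    simp only [List.foldl_cons, ih, pvBest]
    cases hix : PySem.List.index? prefs ph with
    | none => simp only [pvStepB, hix]
    | some r =>
      simp only [pvStepB, hix]
      cases hb : pvBest prefs rest with
      | none =>
        rcases acc with _ | ⟨br, bp⟩ <;> simp only [pvMerge] <;> split_ifs <;> rfl
      | some jq =>
        rcases jq with ⟨j, q⟩
        rcases acc with _ | ⟨br, bp⟩ <;> simp only [pvMerge] <;> split_ifs <;>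
          first
            | rfl
            | (exfalso; omega)
            | (simp only [pvMerge]; split_ifs <;> first | rfl | (exfalso; omega))

theorem pvBest_none (prefs lib : List String) :
    pvBest prefs lib = none ↔ ∀ ph ∈ lib, PySem.List.index? prefs ph = none := by
  induction lib with
  | nil => simp [pvBest]
  | cons ph rest ih =>
    simp only [pvBest, List.mem_cons]
    cases hix : PySem.List.index? prefs ph with
    | none =>
      rw [ih]
      constructor
      · intro h x hx
        rcases hx with rfl | hx
        · exact hix
        · exact h x hx
      · intro h x hx
        exact h x (Or.inr hx)
    | some r =>
      have hne : ¬ (PySem.List.index? prefs ph = none) := by rw [hix]; simp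
      cases hb : pvBest prefs rest with
      | none =>
        constructor
        · intro h; exact absurd h (by simp)
        · intro h; exact absurd (h ph (Or.inl rfl)) hne
      | some jq =>
        rcases jq with ⟨j, q⟩
        constructor
        · intro h
          simp only [] at h
          split_ifs at h <;> exact absurd h (by simp)
        · intro h; exact absurd (h ph (Or.inl rfl)) hne

theorem pvBest_some (prefs lib : List String) (r : Nat) (p : String)
    (h : pvBest prefs lib = some (r, p)) :
    PySem.List.index? prefs p = some r ∧ p ∈ lib ∧
      ∀ ph ∈ lib, ∀ j, PySem.List.index? prefs ph = some j → r ≤ j := by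
  induction lib generalizing r p with
  | nil => simp [pvBest] at h
  | cons ph rest ih =>
    simp only [pvBest] at h
    cases hix : PySem.List.index? prefs ph with
    | none =>
      rw [hix] at h
      obtain ⟨h1, h2, h3⟩ := ih r p h
      refine ⟨h1, List.mem_cons_of_mem _ h2, ?_⟩
      intro x hx j hj
      rcases List.mem_cons.mp hx with rfl | hx
      · rw [hix] at hj; exact absurd hj (by simp)
      · exact h3 x hx j hj
    | some r0 =>
      rw [hix] at h
      cases hb : pvBest prefs rest with
      | none =>
        rw [hb] at h
        simp only [Option.some.injEq, Prod.mk.injEq] at h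
        obtain ⟨rfl, rfl⟩ := h
        refine ⟨hix, List.mem_cons_self, ?_⟩
        intro x hx j hj
        rcases List.mem_cons.mp hx with rfl | hx
        · rw [hix] at hj
          simp only [Option.some.injEq] at hj
          omega
        · exact absurd ((pvBest_none prefs rest).mp hb x hx) (by rw [hj]; simp)
      | some jq =>
        rcases jq with ⟨j0, q0⟩
        rw [hb] at h
        obtain ⟨h1, h2, h3⟩ := ih j0 q0 hb
        simp only [] at h
        split_ifs at h with hlt
        · simp only [Option.some.injEq, Prod.mk.injEq] at h
          obtain ⟨rfl, rfl⟩ := h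
          refine ⟨h1, List.mem_cons_of_mem _ h2, ?_⟩
          intro x hx j hj
          rcases List.mem_cons.mp hx with rfl | hx
          · rw [hix] at hj
            simp only [Option.some.injEq] at hj
            omega
          · exact h3 x hx j hj
        · simp only [Option.some.injEq, Prod.mk.injEq] at h
          obtain ⟨rfl, rfl⟩ := h
          refine ⟨hix, List.mem_cons_self, ?_⟩
          intro x hx j hj
          rcases List.mem_cons.mp hx with rfl | hx
          · rw [hix] at hj
            simp only [Option.some.injEq] at hj
            omega
          · have := h3 x hx j hj; omega

theorem pvFirstIn_none (cands lib : List String) :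
    pvFirstIn cands lib = none ↔ ∀ c ∈ cands, ¬ lib.contains c := by
  induction cands with
  | nil => simp [pvFirstIn]
  | cons c rest ih =>
    by_cases h : c ∈ lib <;> simp_all [pvFirstIn]

theorem pvFirstIn_some (cands lib : List String) (c : String)
    (h : pvFirstIn cands lib = some c) :
    ∃ i, PySem.List.index? cands c = some i ∧ lib.contains c ∧
      ∀ ph j, lib.contains ph → PySem.List.index? cands ph = some j → i ≤ j := by
  induction cands generalizing c with
  | nil => simp [pvFirstIn] at h
  | cons c0 rest ih =>
    simp only [pvFirstIn] at h
    split_ifs at h with hc0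
    · obtain rfl : c0 = c := by simpa using h
      exact ⟨0, PySem.List.index?_cons_self _ _, hc0, fun _ _ _ _ => Nat.zero_le _⟩
    · obtain ⟨i, hi, hcl, hmin⟩ := ih c h
      have hne : c0 ≠ c := fun he => hc0 (he ▸ hcl)
      refine ⟨i + 1, ?_, hcl, ?_⟩
      · rw [PySem.List.index?_cons_of_ne _ hne, hi]; rfl
      · intro ph j hph hj
        have hnep : c0 ≠ ph := fun he => hc0 (he ▸ hph)
        rw [PySem.List.index?_cons_of_ne _ hnep] at hj
        cases hj' : PySem.List.index? rest ph with
        | none => rw [hj'] at hj; exact absurd hj (by simp)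
        | some j' =>
          rw [hj'] at hj
          obtain rfl : j' + 1 = j := by simpa using hj
          have := hmin ph j' hph hj'
          omega

-- index? determines the element: two strings with the same index are equal
theorem pvIndex?_inj (xs : List String) (p q : String) (i : Nat)
    (hp : PySem.List.index? xs p = some i) (hq : PySem.List.index? xs q = some i) : p = q := by
  obtain ⟨hk, he, _⟩ := PySem.List.getElem_of_index?_eq_some hp
  obtain ⟨hk', he', _⟩ := PySem.List.getElem_of_index?_eq_some hq
  rw [← he, ← he']

theorem pvBest_eq_firstIn (prefs lib : List String) :
    (match pvBest prefs lib with
     | some (_, p) => some p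
     | none => none) = pvFirstIn prefs lib := by
  cases hb : pvBest prefs lib with
  | none =>
    cases hf : pvFirstIn prefs lib with
    | none => rfl
    | some c =>
      obtain ⟨i, hi, hcl, _⟩ := pvFirstIn_some prefs lib c hf
      have := (pvBest_none prefs lib).mp hb c (by simpa using hcl)
      rw [this] at hi; exact absurd hi (by simp)
  | some rp =>
    rcases rp with ⟨r, p⟩
    obtain ⟨h1, h2, h3⟩ := pvBest_some prefs lib r p hb
    cases hf : pvFirstIn prefs lib with
    | none =>
      have hmem : p ∈ prefs := (PySem.List.index?_isSome_iff prefs p).mp (by rw [h1]; rfl)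
      exact absurd (by simpa using h2) ((pvFirstIn_none prefs lib).mp hf p hmem)
    | some c =>
      obtain ⟨i, hi, hcl, hmin⟩ := pvFirstIn_some prefs lib c hf
      have hri : r ≤ i := h3 c (by simpa using hcl) i hi
      have hir : i ≤ r := hmin p r (by simpa using h2) h1
      have : i = r := le_antisymm hir hri
      subst this
      rw [pvIndex?_inj prefs p c i h1 hi]

theorem pvLoopA_eq_firstIn (xs lib : List String) : pvLoopA xs lib = pvFirstIn xs lib := by
  induction xs with
  | nil => rfl
  | cons c rest ih => simp [pvLoopA, pvFirstIn, ih]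

theorem pvFirstIn_append (xs ys lib : List String) :
    pvFirstIn (xs ++ ys) lib = (pvFirstIn xs lib).or (pvFirstIn ys lib) := by
  induction xs with
  | nil => rfl
  | cons c rest ih =>
    by_cases h : c ∈ lib <;> simp [pvFirstIn, h, ih]

-- A computes the first preference present in the library
theorem pvA_eq_firstIn (t : String) (lib : List String) :
    find_substitute_phoneme t lib = pvFirstIn (pvPrefs t) lib := by
  unfold find_substitute_phoneme pvPrefs
  by_cases h1 : t ∈ lib
  · simp [pvFirstIn, h1]
  · simp only [List.cons_append, pvFirstIn, pvFirstIn_append,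
      PySem.Dict.getD_eq_get?_getD]
    cases hg : pvSimGroups.get? t with
    | none =>
      simp only [Option.getD_none, pvFirstIn, Option.or]
      have hc0 : ¬ (lib.contains t = true) := by simpa using h1
      rw [if_neg hc0, if_neg hc0]
      split_ifs with hv hcn
      · exact pvLoopA_eq_firstIn _ _
      · exact pvLoopA_eq_firstIn _ _
      · rfl
    | some lst =>
      simp only [Option.getD_some, pvLoopA_eq_firstIn]
      cases hl : pvFirstIn lst lib with
      | some r => simp [h1, Option.or]
      | none =>
        have hc0 : ¬ (lib.contains t = true) := by simpa using h1
        rw [if_neg hc0, if_neg hc0]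
        simp only [Option.or]
        split_ifs with hv hc <;> rfl

-- B computes it too, via its argmin fold
theorem pvB_eq_firstIn (t : String) (lib : List String) :
    find_substitute_phoneme_alt t lib = pvFirstIn (pvPrefs t) lib := by
  show (match List.foldl (pvStepB (pvPrefs t)) none lib with
        | some (_, p) => some p
        | none => none) = pvFirstIn (pvPrefs t) lib
  rw [pvFoldB_eq_best]
  show (match pvMerge none (pvBest (pvPrefs t) lib) with
        | some (_, p) => some p
        | none => none) = pvFirstIn (pvPrefs t) lib
  cases hb : pvBest (pvPrefs t) lib with
  | none => rw [← pvBest_eq_firstIn (pvPrefs t) lib, hb]; rfl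
  | some rp => rw [← pvBest_eq_firstIn (pvPrefs t) lib, hb]; rcases rp with ⟨j, q⟩; rfl

-- ===== VERDICT (by name: the statement is the Claim_ definition above) =====
theorem find_substitute_phoneme_spec : Claim_equal_find_substitute_phoneme := by
  intro t lib _
  unfold Spec_find_substitute_phoneme
  rw [pvA_eq_firstIn, pvB_eq_firstIn]
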